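-- pv_equiv track=rewrite | github.com/aaajiao/Adaptive-RSI-Pro | tools/pine_linter/rules.py | _matching_outer_bracket
-- ===== SOURCE A (Python) =====
-- def _matching_outer_bracket(text: str) -> bool:
--     stripped = text.strip()
--     if not stripped.startswith("[") or not stripped.endswith("]"):
--         return False
--
--     depth = 0
--     in_string = False
--     string_quote = ""
--     in_line_comment = False
--
--     for i, char in enumerate(stripped):
--         next_char = stripped[i + 1] if i + 1 < len(stripped) else ""
--
--         if in_line_comment:
--             if char == "\n":
--                 in_line_comment = False
--             continue
--
--         if in_string:
--             if char == "\\":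
--                 continue
--             if char == string_quote:
--                 in_string = False
--                 string_quote = ""
--             continue
--
--         if char == "/" and next_char == "/":
--             in_line_comment = True
--             continue
--
--         if char in ("'", '"'):
--             in_string = True
--             string_quote = char
--         elif char == "[":
--             depth += 1
--         elif char == "]":
--             depth -= 1
--             if depth == 0 and i != len(stripped) - 1:
--                 return False
--
--     return depth == 0
-- ===== SOURCE B (Python) =====
-- def _matching_outer_bracket(text: str) -> bool:
--     s = text.strip()
--     if not (s.startswith("[") and s.endswith("]")):
--         return False
--     n = len(s)
--
--     # Index-jumping scanner: skip whole strings / line comments with str.find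
--     # instead of a per-character state machine.  (In this dialect a backslash
--     # inside a string merely skips itself, so a string ends at the very next
--     # occurrence of its quote: a plain find is exact.)
--     events = []  # (index, +1/-1) for brackets outside strings and line comments
--     i = 0
--     while i < n:
--         c = s[i]
--         if c == "/" and i + 1 < n and s[i + 1] == "/":
--             j = s.find("\n", i)
--             if j == -1:
--                 break
--             i = j + 1
--         elif c == "'" or c == '"':
--             j = s.find(c, i + 1)
--             if j == -1:
--                 break
--             i = j + 1
--         else:
--             if c == "[":
--                 events.append((i, 1))
--             elif c == "]":
--                 events.append((i, -1))
--             i += 1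
--
--     # Prefix sums plus a single 'any' instead of an early-returning depth loop.
--     prefix = []
--     depth = 0
--     for _, d in events:
--         depth += d
--         prefix.append(depth)
--     bad = any(p == 0 and d == -1 and idx != n - 1
--               for (idx, d), p in zip(events, prefix))
--     return (not bad) and depth == 0
-- ===== Notes on version B (the rewrite author's own statement) =====
-- stated objective: alternative
-- what changed: B replaces A's per-character state machine with an index-jumping scanner that skips whole strings and line comments via str.find (exploiting that a backslash only skips itself, so a string ends at the next quote occurrence), then decides the result with prefix sums and a single any() instead of an early-returning depth loop.
import Mathlib
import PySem

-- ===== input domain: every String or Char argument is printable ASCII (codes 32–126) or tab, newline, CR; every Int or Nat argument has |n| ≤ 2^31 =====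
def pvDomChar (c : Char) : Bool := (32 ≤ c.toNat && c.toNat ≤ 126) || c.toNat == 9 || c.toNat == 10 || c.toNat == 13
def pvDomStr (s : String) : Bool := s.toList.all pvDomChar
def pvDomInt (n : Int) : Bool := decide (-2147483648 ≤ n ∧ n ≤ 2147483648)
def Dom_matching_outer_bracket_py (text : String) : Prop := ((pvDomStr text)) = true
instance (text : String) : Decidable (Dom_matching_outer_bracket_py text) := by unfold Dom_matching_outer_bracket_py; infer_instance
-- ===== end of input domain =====

-- B replaces A's per-character state machine by an index-jumping scanner (strings/comments skipped
-- with a find) followed by a prefix-sum check; alternative decomposition, same asymptotic cost.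

-- ===== PORT A =====
-- A's single loop: state = (depth, in_string, string_quote, in_line_comment), early return on a closing
-- bracket that reaches depth 0 before the last index.  next_char is the head of the remaining list
-- (Python's stripped[i+1] if in range else "").
def pvLoopA : List Char → Nat → Nat → Int → Bool → Option Char → Bool → Bool
  | [], _, _, depth, _, _, _ => depth == 0
  | c :: rest, i, n, depth, inStr, q, inCom =>
    if inCom then
      pvLoopA rest (i+1) n depth inStr q (if c = '\n' then false else true)
    else if inStr then
      if c = '\\' then pvLoopA rest (i+1) n depth inStr q inCom
      else if some c = q then pvLoopA rest (i+1) n depth false none inCom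
      else pvLoopA rest (i+1) n depth inStr q inCom
    else if c = '/' ∧ rest.head? = some '/' then
      pvLoopA rest (i+1) n depth inStr q true
    else if c = '\'' ∨ c = '"' then
      pvLoopA rest (i+1) n depth true (some c) inCom
    else if c = '[' then
      pvLoopA rest (i+1) n (depth + 1) inStr q inCom
    else if c = ']' then
      if depth - 1 = 0 ∧ i ≠ n - 1 then false
      else pvLoopA rest (i+1) n (depth - 1) inStr q inCom
    else
      pvLoopA rest (i+1) n depth inStr q inCom

def matching_outer_bracket_py (text : String) : Bool :=
  if ¬ (PySem.Str.startswith (PySem.Str.strip text) "[") ∨ ¬ (PySem.Str.endswith (PySem.Str.strip text) "]") then false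
  else pvLoopA (PySem.Str.strip text).toList 0 (PySem.Str.strip text).toList.length 0 false none false

-- ===== PORT B =====
-- s.find(ch, i): index of the first occurrence of ch at position ≥ i, none if absent (exact
-- hand port of Python's single-character str.find; Python's -1 becomes none).
def pvFindFrom (cs : List Char) (ch : Char) (i : Nat) : Option Nat :=
  if h : i < cs.length then
    if cs[i] = ch then some i else pvFindFrom cs ch (i + 1)
  else none
termination_by cs.length - i
decreasing_by omega

-- find returns an index no smaller than where the search started (used for pvScan's termination).
theorem pvFindFrom_ge (cs : List Char) (ch : Char) : ∀ i j, pvFindFrom cs ch i = some j → i ≤ j := by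
  intro i
  induction i using pvFindFrom.induct cs ch with
  | case1 i h heq => intro j hj; rw [pvFindFrom, dif_pos h, if_pos heq] at hj; simp at hj; omega
  | case2 i h heq ih =>
    intro j hj
    rw [pvFindFrom, dif_pos h, if_neg heq] at hj
    have := ih j hj
    omega
  | case3 i h => intro j hj; rw [pvFindFrom, dif_neg h] at hj; cases hj

-- Pass 1 of B: the while loop — jump over line comments and strings, record brackets as (index, ±1).
def pvScan (cs : List Char) (i : Nat) : List (Nat × Int) :=
  if hlt : i < cs.length then
    if cs[i] = '/' ∧ cs[i+1]? = some '/' then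
      match hf : pvFindFrom cs '\n' i with
      | none => []
      | some j => pvScan cs (j + 1)
    else if cs[i] = '\'' ∨ cs[i] = '"' then
      match hf : pvFindFrom cs cs[i] (i + 1) with
      | none => []
      | some j => pvScan cs (j + 1)
    else if cs[i] = '[' then (i, 1) :: pvScan cs (i + 1)
    else if cs[i] = ']' then (i, -1) :: pvScan cs (i + 1)
    else pvScan cs (i + 1)
  else []
termination_by cs.length - i
decreasing_by
  · have := pvFindFrom_ge cs '\n' i j hf; omega
  · have := pvFindFrom_ge cs cs[i] (i+1) j hf; omega
  · omega
  · omega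
  · omega

-- Pass 2a of B: the prefix-sum loop — returns (prefix list, final depth).
def pvPrefixDepth : List (Nat × Int) → Int → List Int × Int
  | [], depth => ([], depth)
  | p :: rest, depth =>
    let r := pvPrefixDepth rest (depth + p.2)
    ((depth + p.2) :: r.1, r.2)

-- Pass 2b of B: the 'any' — some closing bracket restores depth 0 before the last index.
def pvBad (events : List (Nat × Int)) (prefixes : List Int) (n : Nat) : Bool :=
  (events.zip prefixes).any fun p => p.2 == 0 && p.1.2 == -1 && decide (p.1.1 ≠ n - 1)

def matching_outer_bracket_py_alt (text : String) : Bool :=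
  let s := PySem.Str.strip text
  if ¬ (PySem.Str.startswith s "[" ∧ PySem.Str.endswith s "]") then false
  else
    let cs := s.toList
    let events := pvScan cs 0
    let pd := pvPrefixDepth events 0
    !pvBad events pd.1 cs.length && (pd.2 == 0)

-- ===== PRECONDITION & SPEC =====
def Spec_matching_outer_bracket_py (text : String) (out : Bool) : Prop := out = matching_outer_bracket_py_alt text
instance (text : String) (out : Bool) : Decidable (Spec_matching_outer_bracket_py text out) := by unfold Spec_matching_outer_bracket_py; infer_instance

-- ===== CLAIM (what is proved, stated in full; the proofs are below) =====
def Claim_equal_matching_outer_bracket_py : Prop := ∀ (text : String), Dom_matching_outer_bracket_py text → Spec_matching_outer_bracket_py text (matching_outer_bracket_py text)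

-- ===== LEMMAS AND PROOFS =====

-- equation lemmas for pvFindFrom
theorem ffrom_stop (cs : List Char) (ch : Char) (i : Nat) (h : ¬ i < cs.length) :
    pvFindFrom cs ch i = none := by rw [pvFindFrom, dif_neg h]

theorem ffrom_hit (cs : List Char) (ch : Char) (i : Nat) (h : i < cs.length) (hc : cs[i] = ch) :
    pvFindFrom cs ch i = some i := by rw [pvFindFrom, dif_pos h, if_pos hc]

theorem ffrom_step (cs : List Char) (ch : Char) (i : Nat) (h : i < cs.length) (hc : cs[i] ≠ ch) :
    pvFindFrom cs ch i = pvFindFrom cs ch (i + 1) := by rw [pvFindFrom, dif_pos h, if_neg hc]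

-- equation lemmas for pvScan
theorem scan_stop (cs : List Char) (i : Nat) (h : ¬ i < cs.length) :
    pvScan cs i = [] := by rw [pvScan, dif_neg h]

theorem scan_comment (cs : List Char) (i : Nat) (hlt : i < cs.length)
    (hcom : cs[i] = '/' ∧ cs[i+1]? = some '/') :
    pvScan cs i = (match pvFindFrom cs '\n' i with
                   | none => []
                   | some j => pvScan cs (j + 1)) := by
  rw [pvScan, dif_pos hlt, if_pos hcom]
  split <;> rename_i heq <;> rw [heq]

theorem scan_quote (cs : List Char) (i : Nat) (hlt : i < cs.length)
    (hcom : ¬ (cs[i] = '/' ∧ cs[i+1]? = some '/')) (hq : cs[i] = '\'' ∨ cs[i] = '"') :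
    pvScan cs i = (match pvFindFrom cs cs[i] (i + 1) with
                   | none => []
                   | some j => pvScan cs (j + 1)) := by
  rw [pvScan, dif_pos hlt, if_neg hcom, if_pos hq]
  split <;> rename_i heq <;> rw [heq]

theorem scan_open (cs : List Char) (i : Nat) (hlt : i < cs.length)
    (hcom : ¬ (cs[i] = '/' ∧ cs[i+1]? = some '/')) (hq : ¬ (cs[i] = '\'' ∨ cs[i] = '"'))
    (hb : cs[i] = '[') :
    pvScan cs i = (i, 1) :: pvScan cs (i + 1) := by
  rw [pvScan, dif_pos hlt, if_neg hcom, if_neg hq, if_pos hb]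

theorem scan_close (cs : List Char) (i : Nat) (hlt : i < cs.length)
    (hcom : ¬ (cs[i] = '/' ∧ cs[i+1]? = some '/')) (hq : ¬ (cs[i] = '\'' ∨ cs[i] = '"'))
    (hb : ¬ cs[i] = '[') (hc : cs[i] = ']') :
    pvScan cs i = (i, -1) :: pvScan cs (i + 1) := by
  rw [pvScan, dif_pos hlt, if_neg hcom, if_neg hq, if_neg hb, if_pos hc]

theorem scan_other (cs : List Char) (i : Nat) (hlt : i < cs.length)
    (hcom : ¬ (cs[i] = '/' ∧ cs[i+1]? = some '/')) (hq : ¬ (cs[i] = '\'' ∨ cs[i] = '"'))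
    (hb : ¬ cs[i] = '[') (hc : ¬ cs[i] = ']') :
    pvScan cs i = pvScan cs (i + 1) := by
  rw [pvScan, dif_pos hlt, if_neg hcom, if_neg hq, if_neg hb, if_neg hc]

-- Proof-side intermediate: A's early-returning depth logic over an event list.
def pvDepthA : List (Nat × Int) → Nat → Int → Bool
  | [], _, depth => depth == 0
  | (i, d) :: rest, n, depth =>
    if d = 1 then pvDepthA rest n (depth + 1)
    else if depth - 1 = 0 ∧ i ≠ n - 1 then false
    else pvDepthA rest n (depth - 1)

theorem drop_cons_getElem (cs : List Char) (k : Nat) (hk : k < cs.length) :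
    cs.drop k = cs[k] :: cs.drop (k + 1) := List.drop_eq_getElem_cons hk

theorem head?_drop_succ (cs : List Char) (k : Nat) :
    (cs.drop (k + 1)).head? = cs[k + 1]? := by
  rw [List.head?_eq_getElem?, List.getElem?_drop]

-- In comment mode A just looks for the next newline, then resumes at top level.
theorem loopA_comment (cs : List Char) (n : Nat) (depth : Int) :
    ∀ m k, cs.length - k ≤ m →
      pvLoopA (cs.drop k) k n depth false none true =
        (match pvFindFrom cs '\n' k with
         | none => (depth == 0 : Bool)
         | some j => pvLoopA (cs.drop (j+1)) (j+1) n depth false none false) := by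
  intro m
  induction m with
  | zero =>
    intro k hk
    rw [List.drop_eq_nil_of_le (by omega), ffrom_stop cs '\n' k (by omega)]
    rfl
  | succ m ih =>
    intro k hk
    by_cases hlt : k < cs.length
    · rw [drop_cons_getElem cs k hlt]
      by_cases hc : cs[k] = '\n'
      · simp only [pvLoopA, if_true, hc]
        rw [ffrom_hit cs '\n' k hlt hc]
      · simp only [pvLoopA, if_true, if_neg hc]
        rw [ih (k+1) (by omega), ffrom_step cs '\n' k hlt hc]
    · rw [List.drop_eq_nil_of_le (by omega), ffrom_stop cs '\n' k hlt]
      rfl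

-- In string mode (the quote is never a backslash) A just looks for the closing quote, then resumes.
theorem loopA_string (cs : List Char) (n : Nat) (depth : Int) (q : Char) (hq : q ≠ '\\') :
    ∀ m k, cs.length - k ≤ m →
      pvLoopA (cs.drop k) k n depth true (some q) false =
        (match pvFindFrom cs q k with
         | none => (depth == 0 : Bool)
         | some j => pvLoopA (cs.drop (j+1)) (j+1) n depth false none false) := by
  intro m
  induction m with
  | zero =>
    intro k hk
    rw [List.drop_eq_nil_of_le (by omega), ffrom_stop cs q k (by omega)]
    rfl
  | succ m ih =>
    intro k hk
    by_cases hlt : k < cs.length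
    · rw [drop_cons_getElem cs k hlt]
      by_cases hc : cs[k] = q
      · have hb : ¬ cs[k] = '\\' := by rw [hc]; exact hq
        simp only [pvLoopA, Bool.false_eq_true, if_false, if_true, if_neg hb,
          if_pos (congrArg some hc)]
        rw [ffrom_hit cs q k hlt hc]
      · by_cases hb : cs[k] = '\\'
        · simp only [pvLoopA, Bool.false_eq_true, if_false, if_true, if_pos hb]
          rw [ih (k+1) (by omega), ffrom_step cs q k hlt hc]
        · have hcq : ¬ (some cs[k] = some q) := by simp [hc]
          simp only [pvLoopA, Bool.false_eq_true, if_false, if_true, if_neg hb, if_neg hcq]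
          rw [ih (k+1) (by omega), ffrom_step cs q k hlt hc]
    · rw [List.drop_eq_nil_of_le (by omega), ffrom_stop cs q k hlt]
      rfl

-- Fusing B's scan with A's depth logic recovers A's loop in its top-level state.
theorem loopA_eq_scan (cs : List Char) (n : Nat) :
    ∀ m k depth, cs.length - k ≤ m →
      pvLoopA (cs.drop k) k n depth false none false = pvDepthA (pvScan cs k) n depth := by
  intro m
  induction m with
  | zero =>
    intro k depth hk
    rw [List.drop_eq_nil_of_le (by omega), scan_stop cs k (by omega)]
    rfl
  | succ m ih =>
    intro k depth hk
    by_cases hlt : k < cs.length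
    · rw [drop_cons_getElem cs k hlt]
      by_cases h5 : cs[k] = '/' ∧ cs[k+1]? = some '/'
      · have h5' : cs[k] = '/' ∧ (cs.drop (k+1)).head? = some '/' := by
          rw [head?_drop_succ]; exact h5
        simp only [pvLoopA, Bool.false_eq_true, if_false, if_pos h5']
        rw [loopA_comment cs n depth (m+1) (k+1) (by omega),
          ← ffrom_step cs '\n' k hlt (by rw [h5.1]; decide),
          scan_comment cs k hlt h5]
        cases hf : pvFindFrom cs '\n' k with
        | none => rfl
        | some j =>
          have hj : k ≤ j := pvFindFrom_ge cs '\n' k j hf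
          exact ih (j+1) depth (by omega)
      · have h5' : ¬ (cs[k] = '/' ∧ (cs.drop (k+1)).head? = some '/') := by
          rw [head?_drop_succ]; exact h5
        simp only [pvLoopA, Bool.false_eq_true, if_false, if_neg h5']
        by_cases h6 : cs[k] = '\'' ∨ cs[k] = '"'
        · simp only [if_pos h6]
          have hq : cs[k] ≠ '\\' := by rcases h6 with h6 | h6 <;> simp [h6]
          rw [loopA_string cs n depth cs[k] hq (m+1) (k+1) (by omega),
            scan_quote cs k hlt h5 h6]
          cases hf : pvFindFrom cs cs[k] (k+1) with
          | none => rfl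
          | some j =>
            have hj : k + 1 ≤ j := pvFindFrom_ge cs cs[k] (k+1) j hf
            exact ih (j+1) depth (by omega)
        · simp only [if_neg h6]
          by_cases h7 : cs[k] = '['
          · rw [scan_open cs k hlt h5 h6 h7]
            simp only [if_pos h7, pvDepthA]
            exact ih (k+1) (depth + 1) (by omega)
          · simp only [if_neg h7]
            by_cases h8 : cs[k] = ']'
            · rw [scan_close cs k hlt h5 h6 h7 h8]
              simp only [if_pos h8, pvDepthA, if_neg (by decide : ¬ ((-1 : Int) = 1))]
              by_cases h9 : depth - 1 = 0 ∧ k ≠ n - 1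
              · simp only [if_pos h9]
              · simp only [if_neg h9]
                exact ih (k+1) (depth - 1) (by omega)
            · rw [scan_other cs k hlt h5 h6 h7 h8]
              simp only [if_neg h8]
              exact ih (k+1) depth (by omega)
    · rw [List.drop_eq_nil_of_le (by omega), scan_stop cs k hlt]
      rfl

-- every event of B's scan is a bracket: delta ±1
theorem pvScan_deltas (cs : List Char) : ∀ i, ∀ p ∈ pvScan cs i, p.2 = 1 ∨ p.2 = -1 := by
  intro i
  induction i using pvScan.induct cs with
  | case1 i hlt hcom hf =>
    intro p hp; rw [scan_comment cs i hlt hcom, hf] at hp; cases hp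
  | case2 i hlt hcom j hf ih =>
    intro p hp; rw [scan_comment cs i hlt hcom, hf] at hp; exact ih p hp
  | case3 i hlt hcom hq hf =>
    intro p hp; rw [scan_quote cs i hlt hcom hq, hf] at hp; cases hp
  | case4 i hlt hcom hq j hf ih =>
    intro p hp; rw [scan_quote cs i hlt hcom hq, hf] at hp; exact ih p hp
  | case5 i hlt hcom hq hb ih =>
    intro p hp
    rw [scan_open cs i hlt hcom hq hb] at hp
    rcases List.mem_cons.mp hp with hp | hp
    · left; rw [hp]
    · exact ih p hp
  | case6 i hlt hcom hq hb hc ih =>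
    intro p hp
    rw [scan_close cs i hlt hcom hq hb hc] at hp
    rcases List.mem_cons.mp hp with hp | hp
    · right; rw [hp]
    · exact ih p hp
  | case7 i hlt hcom hq hb hc ih =>
    intro p hp; rw [scan_other cs i hlt hcom hq hb hc] at hp; exact ih p hp
  | case8 i hlt =>
    intro p hp; rw [scan_stop cs i hlt] at hp; cases hp

-- A's early-returning depth logic equals B's prefix-sum + any formulation.
theorem depthA_eq_bad (n : Nat) :
    ∀ events : List (Nat × Int), (∀ p ∈ events, p.2 = 1 ∨ p.2 = -1) → ∀ depth : Int,
      pvDepthA events n depth =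
        (!pvBad events (pvPrefixDepth events depth).1 n && ((pvPrefixDepth events depth).2 == 0)) := by
  intro events
  induction events with
  | nil => intro _ depth; simp [pvDepthA, pvPrefixDepth, pvBad]
  | cons p rest ih =>
    intro hall depth
    obtain ⟨i, d⟩ := p
    have hd : d = 1 ∨ d = -1 := hall (i, d) (List.mem_cons_self)
    have hrest : ∀ p ∈ rest, p.2 = 1 ∨ p.2 = -1 := fun p hp => hall p (List.mem_cons_of_mem _ hp)
    simp only [pvDepthA, pvPrefixDepth, pvBad, List.zip_cons_cons, List.any_cons]
    rcases hd with hd | hd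
    · subst hd
      rw [if_pos (rfl : (1 : Int) = 1), ih hrest (depth + 1)]
      simp [pvBad]
    · subst hd
      simp only [if_neg (by decide : ¬ ((-1 : Int) = 1))]
      rw [show (depth - 1 : Int) = depth + -1 from by ring]
      by_cases h9 : depth + -1 = 0 ∧ i ≠ n - 1
      · rw [if_pos h9]
        have hpred : (depth + -1 == 0 && ((-1 : Int) == -1) && decide (i ≠ n - 1)) = true := by
          simp [h9.1, h9.2]
        rw [hpred]
        simp
      · rw [if_neg h9, ih hrest (depth + -1)]
        have hpred : (depth + -1 == 0 && ((-1 : Int) == -1) && decide (i ≠ n - 1)) = false := by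
          rcases not_and_or.mp h9 with h | h
          · simp only [Bool.and_eq_false_iff]; left; left; simpa using h
          · simp only [Bool.and_eq_false_iff]; right; simpa using not_not.mp h
        rw [hpred]
        simp [pvBad]

theorem matching_outer_bracket_py_eq (text : String) :
    matching_outer_bracket_py text = matching_outer_bracket_py_alt text := by
  unfold matching_outer_bracket_py matching_outer_bracket_py_alt
  by_cases h1 : PySem.Str.startswith (PySem.Str.strip text) "[" = true
  · by_cases h2 : PySem.Str.endswith (PySem.Str.strip text) "]" = true
    · rw [if_neg (by rw [h1, h2]; simp), if_neg (by rw [h1, h2]; simp)]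
      have h := loopA_eq_scan (PySem.Str.strip text).toList
        (PySem.Str.strip text).toList.length
        ((PySem.Str.strip text).toList.length) 0 0 (by omega)
      rw [List.drop_zero] at h
      rw [h]
      exact depthA_eq_bad _ _ (pvScan_deltas _ 0) 0
    · rw [if_pos (Or.inr h2), if_pos (fun hab => h2 hab.2)]
  · rw [if_pos (Or.inl h1), if_pos (fun hab => h1 hab.1)]

-- ===== VERDICT (by name: the statement is the Claim_ definition above) =====
theorem matching_outer_bracket_py_spec : Claim_equal_matching_outer_bracket_py := by
  unfold Claim_equal_matching_outer_bracket_py Spec_matching_outer_bracket_py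
  intro text _
  exact matching_outer_bracket_py_eq text
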